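-- pv_equiv track=rewrite | github.com/MvDDD/py_so_test | generate.py | resolve_type
-- ===== SOURCE A (Python) =====
-- def resolve_type(type, classes, structs):
--     if type.startswith("ptr<"):
--         return f"ptr({resolve_type(type[4:-1], classes, structs)})"
--     elif type in classes:
--         return f"{type}.Struct"
--     elif type in structs:
--         return f"{type}"
--     else:
--         return type
-- ===== SOURCE B (Python) =====
-- def resolve_type(type, classes, structs):
--     depth = 0
--     while type.startswith("ptr<"):
--         type = type[4:-1]
--         depth += 1
--     base = f"{type}.Struct" if type in classes else type
--     return "ptr(" * depth + base + ")" * depth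
-- ===== Notes on version B (the rewrite author's own statement) =====
-- stated objective: alternative
-- what changed: Replaces A's recursion (recursive call wrapped per pointer layer) by an explicit peel loop that counts layers, a single base-name resolution, and one final wrap step that concatenates depth copies of 'ptr(' and ')'.
import Mathlib
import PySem

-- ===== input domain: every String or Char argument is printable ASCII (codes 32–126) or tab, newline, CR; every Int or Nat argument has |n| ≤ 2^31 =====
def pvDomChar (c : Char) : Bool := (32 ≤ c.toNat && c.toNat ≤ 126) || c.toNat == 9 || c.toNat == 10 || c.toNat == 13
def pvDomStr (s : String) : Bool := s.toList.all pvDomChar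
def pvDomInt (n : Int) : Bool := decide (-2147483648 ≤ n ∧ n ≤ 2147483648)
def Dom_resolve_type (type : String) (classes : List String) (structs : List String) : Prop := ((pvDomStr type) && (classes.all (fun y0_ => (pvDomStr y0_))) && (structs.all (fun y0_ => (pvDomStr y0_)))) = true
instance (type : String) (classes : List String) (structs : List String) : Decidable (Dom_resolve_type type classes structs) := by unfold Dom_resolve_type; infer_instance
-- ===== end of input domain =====

-- B replaces A's recursion by an explicit peel loop plus a single wrap step (objective: alternative decomposition, same cost).

-- termination fact both ports' recursion/loop needs: peeling "ptr<…"[4:-1] shrinks the string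
lemma pvSliceLenLt (t : List Char) (h : PySem.Chars.startswith t "ptr<".toList = true) :
    (PySem.Chars.slice t (some 4) (some (-1))).length < t.length := by
  have h4 : 4 ≤ t.length := by
    have := ((PySem.Chars.startswith_iff t "ptr<".toList).mp h).length_le
    simpa using this
  rw [PySem.Chars.slice_eq_listSlice, PySem.List.length_slice, PySem.List.clampIdx_neg_one]
  omega

-- ===== PORT A =====
-- A's recursion, on the code points (strings go through .toList once; String.append is kernel-opaque)
def resolveTypeCharsA (t : List Char) (classes : List String) (structs : List String) : List Char :=
  if h : PySem.Chars.startswith t "ptr<".toList then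
    "ptr(".toList ++ resolveTypeCharsA (PySem.Chars.slice t (some 4) (some (-1))) classes structs ++ [')']
  else if String.mk t ∈ classes then t ++ ".Struct".toList
  else if String.mk t ∈ structs then t
  else t
termination_by t.length
decreasing_by exact pvSliceLenLt t h

def resolve_type (type : String) (classes : List String) (structs : List String) : String :=
  String.mk (resolveTypeCharsA type.toList classes structs)

-- ===== PORT B =====
-- the while-loop: strip one "ptr<…>" layer per step, counting layers
def peelPtr (t : List Char) (depth : Nat) : List Char × Nat :=
  if h : PySem.Chars.startswith t "ptr<".toList then
    peelPtr (PySem.Chars.slice t (some 4) (some (-1))) (depth + 1)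
  else (t, depth)
termination_by t.length
decreasing_by exact pvSliceLenLt t h

def resolve_type_alt (type : String) (classes : List String) (structs : List String) : String :=
  let p := peelPtr type.toList 0
  let base := if String.mk p.1 ∈ classes then p.1 ++ ".Struct".toList else p.1
  String.mk ((List.replicate p.2 "ptr(".toList).flatten ++ base ++ List.replicate p.2 ')')

-- ===== PRECONDITION & SPEC =====
def Spec_resolve_type (type : String) (classes : List String) (structs : List String) (out : String) : Prop := out = resolve_type_alt type classes structs
instance (type : String) (classes : List String) (structs : List String) (out : String) : Decidable (Spec_resolve_type type classes structs out) := by unfold Spec_resolve_type; infer_instance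

-- ===== CLAIM (what is proved, stated in full; the proofs are below) =====
def Claim_equal_resolve_type : Prop := ∀ (type : String) (classes : List String) (structs : List String), Dom_resolve_type type classes structs → Spec_resolve_type type classes structs (resolve_type type classes structs)

-- ===== LEMMAS AND PROOFS =====

-- the accumulator of peelPtr only shifts the depth
lemma peelPtr_acc (t : List Char) (d : Nat) :
    peelPtr t d = ((peelPtr t 0).1, (peelPtr t 0).2 + d) := by
  by_cases h : PySem.Chars.startswith t "ptr<".toList = true
  · have step : ∀ e : Nat, peelPtr t e =
        peelPtr (PySem.Chars.slice t (some 4) (some (-1))) (e + 1) := by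
      intro e; rw [peelPtr, dif_pos h]
    rw [step d, step 0,
      peelPtr_acc (PySem.Chars.slice t (some 4) (some (-1))) (d + 1),
      peelPtr_acc (PySem.Chars.slice t (some 4) (some (-1))) (0 + 1)]
    simp; omega
  · rw [peelPtr, dif_neg h, peelPtr, dif_neg h]; simp
termination_by t.length
decreasing_by all_goals exact pvSliceLenLt t h

-- A's recursion computes exactly B's peel-resolve-wrap result
lemma resolveA_eq_wrap (t : List Char) (classes structs : List String) :
    resolveTypeCharsA t classes structs =
      (List.replicate (peelPtr t 0).2 "ptr(".toList).flatten ++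
        (if String.mk (peelPtr t 0).1 ∈ classes then (peelPtr t 0).1 ++ ".Struct".toList else (peelPtr t 0).1) ++
        List.replicate (peelPtr t 0).2 ')' := by
  by_cases h : PySem.Chars.startswith t "ptr<".toList = true
  · rw [resolveTypeCharsA, dif_pos h, peelPtr, dif_pos h,
      peelPtr_acc (PySem.Chars.slice t (some 4) (some (-1))) (0 + 1),
      resolveA_eq_wrap (PySem.Chars.slice t (some 4) (some (-1))) classes structs]
    simp [List.replicate_succ]
    rw [← List.replicate_succ', List.replicate_succ]
  · rw [resolveTypeCharsA, dif_neg h, peelPtr, dif_neg h]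
    by_cases hc : String.mk t ∈ classes
    · simp [hc]
    · by_cases hs : String.mk t ∈ structs <;> simp [hc, hs]
termination_by t.length
decreasing_by all_goals exact pvSliceLenLt t h

-- ===== VERDICT (by name: the statement is the Claim_ definition above) =====
theorem resolve_type_spec : Claim_equal_resolve_type := by
  intro type classes structs _
  unfold Spec_resolve_type resolve_type resolve_type_alt
  rw [resolveA_eq_wrap]
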